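/- PORTED by tools/port_fixed.py from Prog/Jsmn/S/ParseHead.lean to THE FIXED IMAGE fixed/jsmn_s.bin (same bytes at the same addresses; binFSc). Do not edit: edit the original and port again. -/
/-
  jsmn_s.bin: `jsmn_parse`, the loop head with the character dispatch — the compare chain for the characters above `:` and THE JUMP TABLE
  (50 quadwords at 1007C0H) for 09H … 3AH —, `parser->pos++` and `case ':'`.
-/
import Prog.Jsmn.Fixed.Specs
import X86.Derived.Prog.ImageFile
import Prog.Jsmn.Fixed.CodeFS
import Prog.Jsmn.Fixed.S.ParseLemmas
import Prog.Jsmn.D.ParseHead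

namespace X86
namespace J6
namespace FS
open X86.User (CodeAt RegsKept Span FlagsOK Layout toNat_add_ofNat toNat_ofNat_lt' add_ofNat_add)
open Jsmn JsmnFSBytes

set_option maxRecDepth 100000
set_option maxHeartbeats 4000000
set_option linter.unusedSimpArgs false
set_option linter.unusedVariables false

/-! ### The jump table in memory -/

open ImageFile (leVal)

/-- Where entry `k` of the jump table points, by the character `k + 9` it stands for: white space → `pos++`, `"`, `,`, `-` and the digits → the
primitive, `:`, everything else → `default`. -/
theorem table_target : ∀ k, k < 50 →
    (leVal ((rodata_bytes.drop (8 * k)).take 8) = 0x100486 ∧ (k = 0 ∨ k = 1 ∨ k = 4 ∨ k = 23)) ∨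
    (leVal ((rodata_bytes.drop (8 * k)).take 8) = 0x100438 ∧ k = 25) ∨
    (leVal ((rodata_bytes.drop (8 * k)).take 8) = 0x1004d2 ∧ k = 35) ∨
    (leVal ((rodata_bytes.drop (8 * k)).take 8) = 0x1004fe ∧ (k = 36 ∨ (39 ≤ k ∧ k ≤ 48))) ∨
    (leVal ((rodata_bytes.drop (8 * k)).take 8) = 0x10047d ∧ k = 49) ∨
    (leVal ((rodata_bytes.drop (8 * k)).take 8) = 0x1005c6 ∧ k ≠ 0 ∧ k ≠ 1 ∧ k ≠ 4 ∧ k ≠ 23 ∧ k ≠ 25 ∧ k ≠ 35 ∧ k ≠ 36 ∧ (k < 39 ∨ 48 < k) ∧ k ≠ 49) := by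
  decide

/-- Entry `k` of the jump table as the machine reads it (`jmp QWORD PTR [rbx*8 + 1007C0H]`). -/
theorem table_read {μ : User.Mem} (h : CodeAt μ 0x100000 image_bytes) (k : Nat) (hk : k < 50) :
    μ.readLE (0x1007c0 + UInt64.ofNat (8 * k)) 8 = leVal ((rodata_bytes.drop (8 * k)).take 8) :=
  ImageFile.readLE_slice (JsmnFS.tjfs_rodata_code h) 8 (8 * k) (by
    have : rodata_bytes.length = 400 := by decide
    omega)

/-- The slot of the jump table the machine reads for the character `k` (9 ≤ k ≤ 58): `rbx*8 + 1007C0H` with `bl = k - 9`. -/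
theorem table_addr (k : Nat) (h9 : 9 ≤ k) (h58 : k ≤ 58) :
    Word.low .w8 (UInt64.ofNat k - 9) * 8 + 1050560 = 0x1007c0 + UInt64.ofNat (8 * (k - 9)) := by
  word_omega

/-! ### The compare chain above `:` -/

/-- The three bit tests for a character `k` in `[` … `}` (`mov eax, 1 ; shl rax, cl` with `cl = k - 5BH`, then `test eax, 2080800H` = `f n t`,
`test rax, 400000004H` = `] }`, `test rax, 100000001H` = `[ {`). -/
theorem brk_bits : ∀ k, k < 126 → 91 ≤ k →
    ((((Word.shift .shl .w64 1 (Word.low .w8 (UInt64.ofNat k - 91))) &&& 34080768).toNat % 4294967296 ≠ 0 ↔ (k = 102 ∨ k = 110 ∨ k = 116)) ∧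
     (((Word.shift .shl .w64 1 (Word.low .w8 (UInt64.ofNat k - 91))) &&& 17179869188).toNat ≠ 0 ↔ (k = 93 ∨ k = 125)) ∧
     (((Word.shift .shl .w64 1 (Word.low .w8 (UInt64.ofNat k - 91))) &&& 4294967297).toNat ≠ 0 ↔ (k = 91 ∨ k = 123))) := by
  decide

/-! ### Which character reaches which entry -/

/-- The first characters of a primitive in strict mode, as numbers: `-`, a digit, `t`, `f`, `n`. -/
theorem primStart_nat : ∀ k, k < 256 →
    (primStart (UInt8.ofNat k) = true ↔ (k = 45 ∨ (48 ≤ k ∧ k ≤ 57) ∨ k = 116 ∨ k = 102 ∨ k = 110)) := by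
  decide

theorem primStart_iff (ch : UInt8) :
    primStart ch = true ↔ (ch.toNat = 45 ∨ (48 ≤ ch.toNat ∧ ch.toNat ≤ 57) ∨ ch.toNat = 116 ∨ ch.toNat = 102 ∨ ch.toNat = 110) := by
  have h := primStart_nat ch.toNat ch.toNat_lt
  rwa [UInt8.ofNat_toNat] at h

theorem dispatch_colon (ch : UInt8) (h : ch.toNat = 58) : Dispatch ch 0x10047d := Or.inl ⟨byte_eq_ofNat_of_toNat (k := 58) h (by omega), rfl⟩
theorem dispatch_quote (ch : UInt8) (h : ch.toNat = 34) : Dispatch ch 0x100438 := Or.inr (Or.inl ⟨byte_eq_ofNat_of_toNat (k := 34) h (by omega), rfl⟩)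
theorem dispatch_open (ch : UInt8) (h : ch.toNat = 123 ∨ ch.toNat = 91) : Dispatch ch 0x10033f :=
  Or.inr (Or.inr (Or.inl ⟨h.imp (fun h => byte_eq_ofNat_of_toNat (b := ch) (k := 123) h (by omega)) (fun h => byte_eq_ofNat_of_toNat (b := ch) (k := 91) h (by omega)), rfl⟩))
theorem dispatch_close (ch : UInt8) (h : ch.toNat = 125 ∨ ch.toNat = 93) : Dispatch ch 0x1003b7 :=
  Or.inr (Or.inr (Or.inr (Or.inl ⟨h.imp (fun h => byte_eq_ofNat_of_toNat (b := ch) (k := 125) h (by omega)) (fun h => byte_eq_ofNat_of_toNat (b := ch) (k := 93) h (by omega)), rfl⟩)))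
theorem dispatch_comma (ch : UInt8) (h : ch.toNat = 44) : Dispatch ch 0x1004d2 :=
  Or.inr (Or.inr (Or.inr (Or.inr (Or.inl ⟨byte_eq_ofNat_of_toNat (k := 44) h (by omega), rfl⟩))))
theorem dispatch_ws (ch : UInt8) (h : ch.toNat = 9 ∨ ch.toNat = 10 ∨ ch.toNat = 13 ∨ ch.toNat = 32) : Dispatch ch 0x100486 := by
  refine Or.inr (Or.inr (Or.inr (Or.inr (Or.inr (Or.inl ⟨?_, rfl⟩)))))
  rcases h with h | h | h | h
  · exact Or.inl (byte_eq_ofNat_of_toNat (k := 9) h (by omega))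
  · exact Or.inr (Or.inr (Or.inl (byte_eq_ofNat_of_toNat (k := 10) h (by omega))))
  · exact Or.inr (Or.inl (byte_eq_ofNat_of_toNat (k := 13) h (by omega)))
  · exact Or.inr (Or.inr (Or.inr (byte_eq_ofNat_of_toNat (k := 32) h (by omega))))
theorem dispatch_prim (ch : UInt8)
    (h : ch.toNat = 45 ∨ (48 ≤ ch.toNat ∧ ch.toNat ≤ 57) ∨ ch.toNat = 116 ∨ ch.toNat = 102 ∨ ch.toNat = 110) : Dispatch ch 0x1004fe :=
  Or.inr (Or.inr (Or.inr (Or.inr (Or.inr (Or.inr ⟨(primStart_iff ch).mpr h, rfl⟩)))))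

/-- A character of `default:`, from what the compare chain and the jump table know of it. -/
theorem inval_char (ch : UInt8)
    (h : ch.toNat ≠ 123 ∧ ch.toNat ≠ 91 ∧ ch.toNat ≠ 125 ∧ ch.toNat ≠ 93 ∧ ch.toNat ≠ 34 ∧ ch.toNat ≠ 9 ∧ ch.toNat ≠ 13 ∧ ch.toNat ≠ 10 ∧
      ch.toNat ≠ 32 ∧ ch.toNat ≠ 58 ∧ ch.toNat ≠ 44 ∧ ch.toNat ≠ 45 ∧ (ch.toNat < 48 ∨ 57 < ch.toNat) ∧ ch.toNat ≠ 116 ∧ ch.toNat ≠ 102 ∧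
      ch.toNat ≠ 110) : InvalChar ch := by
  obtain ⟨h1, h2, h3, h4, h5, h6, h7, h8, h9, h10, h11, h12, h13, h14, h15, h16⟩ := h
  refine ⟨byte_ne_ofNat_of_toNat (k := 123) h1 (by omega), byte_ne_ofNat_of_toNat (k := 91) h2 (by omega), byte_ne_ofNat_of_toNat (k := 125) h3 (by omega), byte_ne_ofNat_of_toNat (k := 93) h4 (by omega),
    byte_ne_ofNat_of_toNat (k := 34) h5 (by omega), byte_ne_ofNat_of_toNat (k := 9) h6 (by omega), byte_ne_ofNat_of_toNat (k := 13) h7 (by omega), byte_ne_ofNat_of_toNat (k := 10) h8 (by omega),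
    byte_ne_ofNat_of_toNat (k := 32) h9 (by omega), byte_ne_ofNat_of_toNat (k := 58) h10 (by omega), byte_ne_ofNat_of_toNat (k := 44) h11 (by omega), ?_⟩
  apply Bool.eq_false_iff.mpr
  intro hp
  have := (primStart_iff ch).mp hp
  omega

/-! ### The loop head -/

set_option hygiene false in
/-- The end of a dispatch path: at the case entry `a`, by the dispatch lemma `d`. -/
macro "heads_end_f " a:term ", " d:term : tactic => `(tactic| (
  have hmore := D.more_of hlt hce (by v3_omega)
  refine Reach.done (Or.inr (Or.inl ⟨$a, $d _ (by v3_omega), ⟨by v3_regnorm, hfr.of_kept (by v3_memnorm) (by v3_kept), ?_, ?_, hmore, hce.symm⟩⟩))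
  · first
      | (intro _; v3_regnorm; exact Word.low32_ofNat_byte _)
      | (intro h; exact absurd h (by decide))
  · first
      | (intro _; v3_regnorm; done)
      | (intro h; exact absurd h (by decide))))

set_option hygiene false in
/-- The end of a `default:` path: at 100325H with -2 in r12d. -/
macro "heads_inval_f" : tactic => `(tactic| (
  have hmore := D.more_of hlt hce (by v3_omega)
  exact Reach.done (Or.inr (Or.inr ⟨hmore, inval_char _ (by v3_omega), by v3_regnorm, hf.of_kept (by v3_memnorm) (by v3_kept), by v3_regnorm; rfl⟩))))

set_option hygiene false in
/-- The walk through the jump table once the slot's value `t` is known (`htabN`). -/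
macro "heads_table_f " t:term : tactic => `(tactic| (
  have htab : UInt64.ofNat (v.mem.readLE (Word.low .w8 (UInt64.ofNat ch.toNat - 9) * 8 + 1050560) 8) = $t := by rw [htabN]; rfl
  have htlt : ($t : Word) < 0x40000000 := by decide
  v3_walk hcode hf.entry.pre.call.fetch [hlow, hch, htab, htlt, j1, j2, j3] until [0x100486, 0x100438, 0x1004d2, 0x1004fe, 0x10047d, 0x100325]))

/-- 10048FH: the loop test, then the `switch`: the characters above `:` by a compare chain and three bit tests, 09H … 3AH through the jump table. -/
theorem head_spec (n : User.Layout) : HeadSpec n := by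
  intro c v0 v s hrip hfr
  have hcode := hfr.core.code
  have himg := hfr.core.image
  have htext := hfr.core.text
  have hf := hfr.core
  have hpos := hfr.inv.pos
  v3_open hf.rbp hf.r15 hf.r14 hf.parser hf.entry.pre.jslt hf.entry.pre.env.parserR hf.entry.pre.env.jsR hf.entry.pre.call
  j6f_bin
  have hlow : Word.low .w32 (UInt64.ofNat s.p.pos) = UInt64.ofNat s.p.pos := by v3_omega
  -- `jmp rel32` (E9) is not `jmp rel8` (EB): the walk asks
  have j1 : ((233 : Nat) == 235) = false := by decide
  have j2 : ((233 : UInt8) == 235) = false := by decide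
  have j3 : ((233 : UInt64) == 235) = false := by decide
  by_cases hlt : s.p.pos < c.js.length
  · -- a character is read
    have hch := D.text_read htext s.p.pos hlt
    have hc256 := (charAt c.js s.p.pos).toNat_lt
    generalize hce : charAt c.js s.p.pos = ch at hch hc256 ⊢
    by_cases hrange : 9 ≤ ch.toNat ∧ ch.toNat ≤ 58
    · -- 09H … 3AH: through the jump table; the slot is read out of the image first
      obtain ⟨h9, h58⟩ := hrange
      have htabN := table_read himg (ch.toNat - 9) (by omega)
      rw [← table_addr ch.toNat h9 h58] at htabN
      rcases table_target (ch.toNat - 9) (by omega) with ⟨e, hk⟩ | ⟨e, hk⟩ | ⟨e, hk⟩ | ⟨e, hk⟩ | ⟨e, hk⟩ | ⟨e, hk⟩ <;> rw [e] at htabN <;> clear e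
      · heads_table_f 0x100486
        heads_end_f 0x100486, dispatch_ws
      · heads_table_f 0x100438
        heads_end_f 0x100438, dispatch_quote
      · heads_table_f 0x1004d2
        heads_end_f 0x1004d2, dispatch_comma
      · heads_table_f 0x1004fe
        heads_end_f 0x1004fe, dispatch_prim
      · heads_table_f 0x10047d
        heads_end_f 0x10047d, dispatch_colon
      · heads_table_f 0x1005c6
        heads_inval_f
    · -- 0, 01H … 08H, above `:` (and 80H … FFH, negative as signed bytes)
      v3_walk hcode hf.entry.pre.call.fetch [hlow, hch, j1, j2, j3] until [0x100587, 0x10033f, 0x1003b7, 0x1004fe, 0x100325]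
      · -- NUL: the loop ends
        have h0 : ch = 0 := byte_eq_ofNat_of_toNat (k := 0) (by v3_omega) (by omega)
        have hmore : more c.js s.p.pos = false := by simp [more, hce, h0]
        exact Reach.done (Or.inl ⟨hmore, by v3_regnorm, hfr.of_kept (by v3_memnorm) (by v3_kept)⟩)
      · heads_inval_f
      · heads_inval_f
      · -- `f n t`
        have hb := brk_bits ch.toNat (by v3_omega) (by v3_omega)
        have h1 := hb.1.mp hbr_1002f7
        clear hb hbr_1002f7
        heads_end_f 0x1004fe, dispatch_prim
      · -- `] }`
        have hb := brk_bits ch.toNat (by v3_omega) (by v3_omega)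
        have h2 := hb.2.1.mp hbr_10030a
        clear hb hbr_1002f7 hbr_10030a
        heads_end_f 0x1003b7, dispatch_close
      · -- `[ {`
        have hb := brk_bits ch.toNat (by v3_omega) (by v3_omega)
        have h3 := hb.2.2.mp hbr_10031d
        clear hb hbr_1002f7 hbr_10030a hbr_10031d
        heads_end_f 0x10033f, dispatch_open
      · -- another character of `[` … `}`
        have hb := brk_bits ch.toNat (by v3_omega) (by v3_omega)
        have h1 : ¬ (ch.toNat = 102 ∨ ch.toNat = 110 ∨ ch.toNat = 116) := fun h => hb.1.mpr h hbr_1002f7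
        have h2 : ¬ (ch.toNat = 93 ∨ ch.toNat = 125) := fun h => hb.2.1.mpr h hbr_10030a
        have h3 : ¬ (ch.toNat = 91 ∨ ch.toNat = 123) := fun h => hb.2.2.mpr h hbr_10031d
        clear hb hbr_1002f7 hbr_10030a hbr_10031d
        heads_inval_f
      · heads_inval_f
  · -- pos ≥ len: the loop ends
    have hmore : more c.js s.p.pos = false := by simp [more, hlt]
    v3_walk hcode hf.entry.pre.call.fetch [hlow] until [0x100587]
    exact Reach.done (Or.inl ⟨hmore, by v3_regnorm, hfr.of_kept (by v3_memnorm) (by v3_kept)⟩)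

/-! ### `parser->pos++` and `case ':'` -/

/-- 100486H → 10048FH: `parser->pos++` (three instructions; one store into the parser struct). -/
theorem next_spec (n : User.Layout) : NextSpec n := by
  intro c v0 v s ⟨hrip, hfr⟩
  have hcode := hfr.core.code
  have hf := hfr.core
  have hpos := hfr.inv.pos
  v3_open hf.rbp hf.parser hf.entry.pre.env.parserR hf.entry.pre.call.nle
  v3_walk hcode hf.entry.pre.call.fetch [] until [0x10048f]
  have hu : (Word.low .w32 (UInt64.ofNat s.p.pos + 1)).toNat = u32 ((s.p.pos : Int) + 1) := by unfold u32; v3_omega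
  have hi := hfr.inv
  refine Reach.done ⟨by v3_regnorm, ⟨hf.store_parser (a := c.pa) (by v3_memnorm; rfl) (by v3_kept) ⟨by omega, by omega⟩ ⟨?_, ?_, ?_⟩, ?_, hfr.cnt,
    ⟨by dsimp only; exact u32_lt _, hi.toknextR, hi.superR, hi.numR, fun ts h => ⟨(hi.toks ts h).len, (hi.toks ts h).small, (hi.toks ts h).toknext,
      (hi.toks ts h).superLo, (hi.toks ts h).superHi, (hi.toks ts h).links⟩⟩⟩⟩
  · rw [← hu]; v3_read
  · v3_frame hf_parser_toknext
  · v3_frame hf_parser_toksuper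
  · v3_regnorm; exact hfr.r12

/-- 10047DH → 100486H: `case ':'`, `parser->toksuper = parser->toknext - 1`. The invariant of the new state comes from `SafeFacts.body`. -/
theorem colon_spec (sf : SafeFacts binFSc.cfg) (n : User.Layout) : ColonSpec n := by
  intro c v0 v s ch fuel hch hat hne
  subst hch
  have hb : body Config.strictLinks c.js fuel c.numTokens s 0x3a = some (.next { s with p := { s.p with toksuper := i32 (s.p.toknext - 1) } }) := by
    simp [body]
  rw [hb]
  show Reach n v (AtNext c n v0 · _)
  have hfr := hat.frame
  have hrip := hat.rip
  have hcode := hfr.core.code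
  have hf := hfr.core
  have htn := hfr.inv.toknextR
  v3_open hf.rbp hf.parser hf.entry.pre.env.parserR hf.entry.pre.call.nle
  v3_walk hcode hf.entry.pre.call.fetch [] until [0x100486]
  have hu : (Word.low .w32 (UInt64.ofNat s.p.toknext - 1)).toNat = u32 ((s.p.toknext : Int) - 1) := by unfold u32; v3_omega
  obtain ⟨hinv, hcnt, _⟩ := (sf.body c.js fuel c.numTokens s 0x3a hfr.inv hfr.cnt).1 _ hb
  refine Reach.done ⟨by v3_regnorm, ⟨hf.store_parser (a := c.pa + 8) (by v3_memnorm; rfl) (by v3_kept) ⟨by v3_omega, by v3_omega⟩ ⟨?_, ?_, ?_⟩, ?_, hcnt, hinv⟩⟩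
  · v3_frame hf_parser_pos
  · v3_frame hf_parser_toknext
  · exact holds32_read (by rw [← hu]; v3_read) (holds32_i32 _)
  · v3_regnorm; exact hfr.r12

end FS
end J6
end X86
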